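-- pv_equiv track=rewrite | github.com/ND0322/CompetitiveProgramming | CF/main.py | find_min_p
-- ===== SOURCE A (Python) =====
-- def find_min_p(k, y, hi):
--     # find minimal p in [1..hi] such that p - p//y >= k
--     lo = 1
--     if lo - lo//y >= k:
--         return lo
--     # quick impossibility check
--     if hi - hi//y < k:
--         return None
--     while lo < hi:
--         mid = (lo + hi) // 2
--         if mid - mid//y >= k:
--             hi = mid
--         else:
--             lo = mid + 1
--     return lo
-- ===== SOURCE B (Python) =====
-- def find_min_p(k, y, hi):
--     # same guards as the original, then a linear forward scan instead of bisection
--     if 1 - 1//y >= k: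
--         return 1
--     if hi - hi//y < k:
--         return None
--     p = 2
--     while p <= hi:
--         if p - p//y >= k:
--             return p
--         p += 1
--     return None
-- ===== Notes on version B (the rewrite author's own statement) =====
-- stated objective: alternative
-- what changed: Replaces the binary-search bisection loop with a linear forward scan from 2 to hi that returns the first p with p - p//y >= k, keeping both guards; Pre_ excludes y == 0, where both programs raise ZeroDivisionError.
import Mathlib
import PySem

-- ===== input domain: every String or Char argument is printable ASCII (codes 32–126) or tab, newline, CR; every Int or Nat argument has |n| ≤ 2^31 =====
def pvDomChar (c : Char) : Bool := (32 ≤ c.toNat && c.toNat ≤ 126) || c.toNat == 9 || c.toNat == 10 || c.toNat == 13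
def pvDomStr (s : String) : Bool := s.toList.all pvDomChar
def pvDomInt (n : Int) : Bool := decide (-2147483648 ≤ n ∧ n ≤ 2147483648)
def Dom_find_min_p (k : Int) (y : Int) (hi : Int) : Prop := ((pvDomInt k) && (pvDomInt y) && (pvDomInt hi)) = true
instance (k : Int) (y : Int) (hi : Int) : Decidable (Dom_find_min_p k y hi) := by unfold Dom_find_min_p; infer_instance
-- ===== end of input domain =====

-- B replaces A's binary-search loop with a linear forward scan (same guards, same result); alternative structure, not faster.


-- ===== PORT A =====
-- the while-loop of A, state (lo, hi)
def find_min_p_loop (k : Int) (y : Int) (lo : Int) (hi : Int) : Int :=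
  if h : lo < hi then
    let mid := PySem.Int.floordiv (lo + hi) 2
    if mid - PySem.Int.floordiv mid y ≥ k then
      find_min_p_loop k y lo mid
    else
      find_min_p_loop k y (mid + 1) hi
  else lo
termination_by (hi - lo).toNat
decreasing_by
  · have := PySem.Int.floordiv_two_mid_bounds (lo := lo) (hi := hi) (le_of_lt h)
    have hlt : PySem.Int.floordiv (lo + hi) 2 < hi :=
      (PySem.Int.floordiv_lt_iff_lt_mul (by norm_num)).2 (by omega)
    omega
  · have := PySem.Int.floordiv_two_mid_bounds (lo := lo) (hi := hi) (le_of_lt h)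
    omega

def find_min_p (k : Int) (y : Int) (hi : Int) : Option Int :=
  let lo : Int := 1
  if lo - PySem.Int.floordiv lo y ≥ k then some lo
  else if hi - PySem.Int.floordiv hi y < k then none
  else some (find_min_p_loop k y lo hi)

-- ===== PORT B =====
-- the while-loop of B: scan p upward while p ≤ hi
def find_min_p_alt_loop (k : Int) (y : Int) (hi : Int) (p : Int) : Option Int :=
  if h : p ≤ hi then
    if p - PySem.Int.floordiv p y ≥ k then some p
    else find_min_p_alt_loop k y hi (p + 1)
  else none
termination_by (hi + 1 - p).toNat
decreasing_by omega

def find_min_p_alt (k : Int) (y : Int) (hi : Int) : Option Int :=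
  if (1 : Int) - PySem.Int.floordiv 1 y ≥ k then some 1
  else if hi - PySem.Int.floordiv hi y < k then none
  else find_min_p_alt_loop k y hi 2

-- ===== PRECONDITION & SPEC =====
-- Pre_ excludes exactly y = 0, on which Python's '//' raises ZeroDivisionError in the first guard.
def Pre_find_min_p (k : Int) (y : Int) (hi : Int) : Prop := y ≠ 0
instance (k : Int) (y : Int) (hi : Int) : Decidable (Pre_find_min_p k y hi) := by unfold Pre_find_min_p; infer_instance
def pvWitness_find_min_p : Int × Int × Int := (3, 2, 10)

def Spec_find_min_p (k : Int) (y : Int) (hi : Int) (out : Option Int) : Prop := out = find_min_p_alt k y hi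
instance (k : Int) (y : Int) (hi : Int) (out : Option Int) : Decidable (Spec_find_min_p k y hi out) := by unfold Spec_find_min_p; infer_instance

-- ===== CLAIM (what is proved, stated in full; the proofs are below) =====
def Claim_equal_find_min_p : Prop := ∀ (k : Int) (y : Int) (hi : Int), Dom_find_min_p k y hi → Pre_find_min_p k y hi → Spec_find_min_p k y hi (find_min_p k y hi)

-- ===== LEMMAS AND PROOFS =====

-- the quantity both programs test: g y p = p - p//y
def pvG (y p : Int) : Int := p - PySem.Int.floordiv p y

lemma pvG_step (y p : Int) (hy : y ≠ 0) : pvG y p ≤ pvG y (p + 1) := by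
  have h1 := PySem.Int.floordiv_mul_add_mod p y
  have h2 := PySem.Int.floordiv_mul_add_mod (p + 1) y
  unfold pvG
  by_contra hlt
  have hd : PySem.Int.floordiv p y + 2 ≤ PySem.Int.floordiv (p + 1) y := by omega
  have hexp : (PySem.Int.floordiv p y + 2) * y = PySem.Int.floordiv p y * y + 2 * y := by ring
  rcases lt_or_gt_of_ne hy with hneg | hpos
  · have hm1 := PySem.Int.mod_neg_bounds (a := p) hneg
    have hm2 := PySem.Int.mod_neg_bounds (a := p + 1) hneg
    have := mul_le_mul_of_nonpos_right hd (le_of_lt hneg)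
    linarith
  · have hm1a := PySem.Int.mod_nonneg (a := p) hpos
    have hm1b := PySem.Int.mod_lt (a := p) hpos
    have hm2a := PySem.Int.mod_nonneg (a := p + 1) hpos
    have := mul_le_mul_of_nonneg_right hd (le_of_lt hpos)
    linarith

lemma pvG_mono (y : Int) (hy : y ≠ 0) {p q : Int} (h : p ≤ q) : pvG y p ≤ pvG y q := by
  induction q, h using Int.le_induction with
  | base => exact le_refl _
  | succ n hn ih => exact le_trans ih (pvG_step y n hy)

-- characterization of A's binary-search loop: it returns the least r in [lo, hi] with k ≤ pvG y r
lemma loopA_char (k y : Int) (hy : y ≠ 0) :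
    ∀ (n : Nat) (lo hi : Int), (hi - lo).toNat ≤ n → lo ≤ hi → k ≤ pvG y hi →
      lo ≤ find_min_p_loop k y lo hi ∧ find_min_p_loop k y lo hi ≤ hi ∧
      k ≤ pvG y (find_min_p_loop k y lo hi) ∧
      ∀ q, lo ≤ q → q < find_min_p_loop k y lo hi → ¬ k ≤ pvG y q := by
  intro n
  induction n with
  | zero =>
    intro lo hi hfuel hle hP
    have : lo = hi := by omega
    subst this
    rw [find_min_p_loop]
    simp only [lt_irrefl, dite_false]
    exact ⟨le_refl _, le_refl _, hP, fun q h1 h2 => absurd h2 (by omega)⟩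
  | succ n ih =>
    intro lo hi hfuel hle hP
    rw [find_min_p_loop]
    by_cases h : lo < hi
    · simp only [h, dite_true]
      have hmid := PySem.Int.floordiv_two_mid_bounds (lo := lo) (hi := hi) (le_of_lt h)
      have hmidlt : PySem.Int.floordiv (lo + hi) 2 < hi :=
        (PySem.Int.floordiv_lt_iff_lt_mul (by norm_num)).2 (by omega)
      set mid := PySem.Int.floordiv (lo + hi) 2 with hmiddef
      by_cases hc : mid - PySem.Int.floordiv mid y ≥ k
      · simp only [hc, ite_true]
        obtain ⟨a, b, c, d⟩ := ih lo mid (by omega) (by omega) hc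
        exact ⟨a, by omega, c, d⟩
      · simp only [hc, ite_false]
        obtain ⟨a, b, c, d⟩ := ih (mid + 1) hi (by omega) (by omega) hP
        refine ⟨by omega, b, c, fun q h1 h2 => ?_⟩
        by_cases hq : q ≤ mid
        · intro hkq
          exact hc (le_trans hkq (pvG_mono y hy hq))
        · exact d q (by omega) h2
    · simp only [h, dite_false]
      have : lo = hi := by omega
      subst this
      exact ⟨le_refl _, le_refl _, hP, fun q h1 h2 => absurd h2 (by omega)⟩

-- characterization of B's linear scan: it returns (some of) the least r in [p, hi] with k ≤ pvG y r
lemma loopB_char (k y hi : Int) :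
    ∀ (n : Nat) (p : Int), (hi + 1 - p).toNat ≤ n → p ≤ hi → k ≤ pvG y hi →
      ∃ r, find_min_p_alt_loop k y hi p = some r ∧ p ≤ r ∧ r ≤ hi ∧
        k ≤ pvG y r ∧ ∀ q, p ≤ q → q < r → ¬ k ≤ pvG y q := by
  intro n
  induction n with
  | zero => intro p hfuel hle hP; omega
  | succ n ih =>
    intro p hfuel hle hP
    rw [find_min_p_alt_loop]
    simp only [hle, dite_true]
    by_cases hc : p - PySem.Int.floordiv p y ≥ k
    · simp only [hc, ite_true]
      exact ⟨p, rfl, le_refl _, hle, hc, fun q h1 h2 => absurd h2 (by omega)⟩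
    · simp only [hc, ite_false]
      have hne : p ≠ hi := by
        intro he; subst he; exact hc hP
      obtain ⟨r, he, a, b, c, d⟩ := ih (p + 1) (by omega) (by omega) hP
      refine ⟨r, he, by omega, b, c, fun q h1 h2 => ?_⟩
      by_cases hq : q = p
      · subst hq; exact hc
      · exact d q (by omega) h2

-- ===== VERDICT (by name: the statement is the Claim_ definition above) =====
theorem find_min_p_spec : Claim_equal_find_min_p := by
  intro k y hi _ hy
  unfold Spec_find_min_p find_min_p find_min_p_alt
  by_cases h1 : (1 : Int) - PySem.Int.floordiv 1 y ≥ k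
  · simp [h1]
  · simp only [h1, ite_false]
    by_cases h2 : hi - PySem.Int.floordiv hi y < k
    · simp [h2]
    · simp only [h2, ite_false]
      have hP : k ≤ pvG y hi := by unfold pvG; omega
      have hP1 : ¬ k ≤ pvG y 1 := by unfold pvG; omega
      have h1hi : 1 < hi := by
        by_contra hle
        exact hP1 (le_trans hP (pvG_mono y hy (by omega)))
      obtain ⟨a, b, c, d⟩ :=
        loopA_char k y hy (hi - 1).toNat 1 hi (by omega) (by omega) hP
      obtain ⟨r, he, a', b', c', d'⟩ :=
        loopB_char k y hi (hi - 1).toNat 2 (by omega) (by omega) hP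
      rw [he]
      set rA := find_min_p_loop k y 1 hi
      have hrA2 : 2 ≤ rA := by
        rcases eq_or_lt_of_le a with h | h
        · exact absurd c (h ▸ hP1)
        · omega
      congr 1
      by_contra hne
      rcases lt_or_gt_of_ne hne with hlt | hlt
      · exact d' rA (by omega) hlt c
      · exact d r (by omega) hlt c'
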